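-- pv_equiv track=rewrite | github.com/KayCy2k2/ung_dung | hoan_vi_1.py | hoan_vi
-- ===== SOURCE A (Python) =====
-- def hoan_vi(mang_gia_tri, mang_kieu_du_lieu):
--      """
--      Hàm hoán vị tập giá trị và kiểu dữ liệu sử dụng thuật toán đệ quy.
--
--      Tham số:
--      mang_gia_tri: Danh sách các giá trị cần hoán vị.
--      mang_kieu_du_lieu: Danh sách các kiểu dữ liệu.
--
--      Trả về:
--      Danh sách các tập giá trị và kiểu dữ liệu hoán vị.
--      """
--      if len(mang_gia_tri) == 0:
--           return [[]]
--      ket_qua = []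
--      for i in range(len(mang_kieu_du_lieu)):
--           mang_gia_tri_moi = mang_gia_tri[:]
--           mang_gia_tri_moi[0] = f"{mang_gia_tri_moi[0]}-{mang_kieu_du_lieu[i]}"
--           for hoan_vi_con in hoan_vi(mang_gia_tri_moi[1:], mang_kieu_du_lieu):
--                ket_qua.append([mang_gia_tri_moi[0]] + hoan_vi_con)
--      return ket_qua
-- ===== SOURCE B (Python) =====
-- def hoan_vi(mang_gia_tri, mang_kieu_du_lieu):
--     # Iterative back-to-front build: start from [[]] and, for each value from
--     # last to first, prepend every "value-type" annotation to every suffix.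
--     ket_qua = [[]]
--     for gia_tri in reversed(mang_gia_tri):
--         ket_qua = [[f"{gia_tri}-{kieu}"] + duoi
--                    for kieu in mang_kieu_du_lieu
--                    for duoi in ket_qua]
--     return ket_qua
-- ===== Notes on version B (the rewrite author's own statement) =====
-- stated objective: alternative
-- what changed: Replaces A's recursion (which re-copies the value list and re-runs the recursion for every type at every level) with a single iterative right-to-left fold that builds all suffix combinations once and prepends each annotated value to them.
import Mathlib
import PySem

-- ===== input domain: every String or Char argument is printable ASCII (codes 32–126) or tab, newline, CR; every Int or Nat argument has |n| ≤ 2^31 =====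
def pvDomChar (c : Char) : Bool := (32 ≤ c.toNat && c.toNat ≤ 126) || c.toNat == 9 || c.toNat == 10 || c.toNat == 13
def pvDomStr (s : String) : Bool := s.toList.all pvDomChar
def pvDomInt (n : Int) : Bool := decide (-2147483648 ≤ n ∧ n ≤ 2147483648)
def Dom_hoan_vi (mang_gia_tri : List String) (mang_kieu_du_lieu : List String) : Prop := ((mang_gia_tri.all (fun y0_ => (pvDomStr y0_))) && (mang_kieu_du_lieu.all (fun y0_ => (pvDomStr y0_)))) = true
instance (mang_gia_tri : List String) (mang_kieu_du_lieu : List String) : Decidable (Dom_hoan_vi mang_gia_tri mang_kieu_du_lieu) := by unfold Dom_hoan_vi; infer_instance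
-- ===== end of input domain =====

-- B replaces A's per-branch list copying recursion by an iterative back-to-front
-- fold that reuses each suffix block (objective: alternative/simpler; no speed claim).

-- ===== PORT A =====
-- literal port of A: empty list returns [[]]; otherwise loop i over range(len(types)),
-- annotate the head with types[i], recurse on the tail, append each combination.
def hoan_vi (mang_gia_tri : List String) (mang_kieu_du_lieu : List String) : List (List String) :=
  match mang_gia_tri with
  | [] => [[]]
  | gia_tri :: rest =>
    (List.range mang_kieu_du_lieu.length).foldl (fun ket_qua i =>
      let dau := gia_tri ++ "-" ++ mang_kieu_du_lieu.getD i ""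
      ket_qua ++ (hoan_vi rest mang_kieu_du_lieu).map (fun con => dau :: con)) []

-- ===== PORT B =====
-- port of Source B: start from [[]]; for each value from last to first, prepend every
-- "value-type" annotation to every already-built suffix.
def hoan_vi_alt (mang_gia_tri : List String) (mang_kieu_du_lieu : List String) : List (List String) :=
  mang_gia_tri.foldr (fun gia_tri ket_qua =>
    mang_kieu_du_lieu.flatMap (fun kieu =>
      ket_qua.map (fun duoi => (gia_tri ++ "-" ++ kieu) :: duoi))) [[]]

-- ===== PRECONDITION & SPEC =====
def Spec_hoan_vi (mang_gia_tri : List String) (mang_kieu_du_lieu : List String) (out : List (List String)) : Prop := out = hoan_vi_alt mang_gia_tri mang_kieu_du_lieu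
instance (mang_gia_tri : List String) (mang_kieu_du_lieu : List String) (out : List (List String)) : Decidable (Spec_hoan_vi mang_gia_tri mang_kieu_du_lieu out) := by unfold Spec_hoan_vi; infer_instance

-- ===== CLAIM (what is proved, stated in full; the proofs are below) =====
def Claim_equal_hoan_vi : Prop := ∀ (mang_gia_tri : List String) (mang_kieu_du_lieu : List String), Dom_hoan_vi mang_gia_tri mang_kieu_du_lieu → Spec_hoan_vi mang_gia_tri mang_kieu_du_lieu (hoan_vi mang_gia_tri mang_kieu_du_lieu)

-- ===== LEMMAS AND PROOFS =====

theorem foldl_append_eq_flatMap' {α β : Type} (l : List α) (g : α → List β) (init : List β) :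
    l.foldl (fun acc x => acc ++ g x) init = init ++ l.flatMap g := by
  induction l generalizing init with
  | nil => simp
  | cons x xs ih => simp [List.foldl, ih, List.append_assoc]

theorem range_flatMap_getD {α β : Type} (ts : List α) (d : α) (g : α → List β) :
    (List.range ts.length).flatMap (fun i => g (ts.getD i d)) = ts.flatMap g := by
  induction ts generalizing g with
  | nil => simp
  | cons t ts ih =>
    simp only [List.length_cons, List.range_succ_eq_map, List.flatMap_cons,
      List.flatMap_map]
    simp only [List.getD_cons_zero, List.getD_cons_succ]
    rw [ih]

theorem hoan_vi_eq_alt (mang_gia_tri mang_kieu_du_lieu : List String) :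
    hoan_vi mang_gia_tri mang_kieu_du_lieu = hoan_vi_alt mang_gia_tri mang_kieu_du_lieu := by
  induction mang_gia_tri with
  | nil => simp [hoan_vi, hoan_vi_alt]
  | cons gia_tri rest ih =>
    rw [hoan_vi, foldl_append_eq_flatMap', List.nil_append,
      range_flatMap_getD mang_kieu_du_lieu ""
        (fun kieu => (hoan_vi rest mang_kieu_du_lieu).map
          (fun con => (gia_tri ++ "-" ++ kieu) :: con)),
      ih]
    rfl

-- ===== VERDICT (by name: the statement is the Claim_ definition above) =====
theorem hoan_vi_spec : Claim_equal_hoan_vi := by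
  intro vs ts _
  exact hoan_vi_eq_alt vs ts
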